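-- pv_equiv track=rewrite | github.com/joffe97/livepapers | flaskr/media.py | get_valid_media_and_format
-- ===== SOURCE A (Python) =====
-- FILE_ENDING_TRANSLATIONS = {
--     "jpg": "jpeg"
-- }
--
-- def translate_file_ending(file_ending):
--     file_ending = file_ending.lower()
--     return FILE_ENDING_TRANSLATIONS[file_ending] if file_ending in FILE_ENDING_TRANSLATIONS else file_ending
--
-- def get_valid_media_and_format(content_type: str, media_types):
--     file_ending = media = ""
--     for media in media_types:
--         if file_ending:
--             break
--         for ending in media_types[media]:
--             tmp_ending = content_type.lower()
--             if f"{media}/{translate_file_ending(ending)}" == tmp_ending: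
--                 file_ending = ending
--                 break
--
--     if not file_ending:
--         return None, None
--     else:
--         return media, file_ending
-- ===== SOURCE B (Python) =====
-- FILE_ENDING_TRANSLATIONS = {
--     "jpg": "jpeg"
-- }
--
-- def translate_file_ending(file_ending):
--     file_ending = file_ending.lower()
--     return FILE_ENDING_TRANSLATIONS[file_ending] if file_ending in FILE_ENDING_TRANSLATIONS else file_ending
--
-- def get_valid_media_and_format(content_type: str, media_types):
--     parts = content_type.lower().rsplit("/", 1)
--     if len(parts) < 2:
--         return None, None
--     media_part, format_part = parts
--     for ending in media_types.get(media_part, []):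
--         if translate_file_ending(ending) == format_part:
--             return media_part, ending
--     return None, None
-- ===== Notes on version B (the rewrite author's own statement) =====
-- stated objective: faster
-- what changed: Replaces the nested scan over all media types (which rebuilds a 'media/ending' string for every pair) by one rsplit of the content type and a single keyed lookup followed by one scan of that key's ending list; this also fixes A's break-placement bug.
-- intended difference: On inputs where the content type matches an ending of a media-type key that is not the last key of the dict, A returns the NEXT key as the media (its break fires after the loop variable is reassigned), e.g. ('image/png', {'image':['png'],'video':['mp4']}) gives ('video','png'); B returns the matching key ('image','png'), which is plainly what was intended. — e.g. on get_valid_media_and_format("image/png", [("image", ["png"]), ("video", ["mp4"])]): A returns (some "video", some "png"), B returns (some "image", some "png")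
-- outside the precondition, e.g. on get_valid_media_and_format('a/b/c', {'a': ['b/c']}): A returns ('a', 'b/c'), B returns (None, None); on get_valid_media_and_format('a/', {'a': ['']}): A returns (None, None), B returns ('a', '')
import Mathlib
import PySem

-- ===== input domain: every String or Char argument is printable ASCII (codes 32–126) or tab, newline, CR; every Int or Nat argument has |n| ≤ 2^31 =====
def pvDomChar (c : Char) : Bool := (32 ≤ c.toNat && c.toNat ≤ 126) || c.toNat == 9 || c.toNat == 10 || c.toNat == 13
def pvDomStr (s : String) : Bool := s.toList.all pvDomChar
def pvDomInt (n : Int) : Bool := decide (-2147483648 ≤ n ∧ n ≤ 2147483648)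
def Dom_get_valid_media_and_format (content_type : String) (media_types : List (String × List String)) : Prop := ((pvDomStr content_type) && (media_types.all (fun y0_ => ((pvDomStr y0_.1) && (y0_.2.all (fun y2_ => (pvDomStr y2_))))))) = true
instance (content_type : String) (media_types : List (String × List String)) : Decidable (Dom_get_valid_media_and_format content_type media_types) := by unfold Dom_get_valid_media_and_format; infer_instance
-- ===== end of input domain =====

-- B replaces A's nested scan over every (media, ending) pair by one rsplit of the
-- content type plus a single keyed lookup, and returns the MATCHING key (A's break
-- fires only after the loop variable has moved on; see D_ below).

-- ===== PORT A =====

-- FILE_ENDING_TRANSLATIONS = {"jpg": "jpeg"}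
def pvFileEndingTranslations : List (String × String) := [("jpg", "jpeg")]

-- translate_file_ending: lower, then translate via the dict if present
def translate_file_ending (file_ending : String) : String :=
  let fe := PySem.Str.lower file_ending
  match (pvFileEndingTranslations.find? (fun p => p.1 == fe)).map Prod.snd with
  | some v => v
  | none => fe

-- media_types[media]: dict lookup = first pair whose key equals media (always found
-- by the Python, since media is iterated from the dict's own keys; [] is unreachable)
def pvVals (media_types : List (String × List String)) (k : String) : List String :=
  match (media_types.find? (fun p => p.1 == k)).map Prod.snd with
  | some v => v
  | none => []

-- inner loop of A: first ending whose "media/translate(ending)" equals content_type.lower(),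
-- leaving file_ending = "" when none matches (exactly the Python's leftover state)
def pvInnerA (content_type : String) (media : String) : List String → String
  | [] => ""
  | e :: es =>
      if media ++ "/" ++ translate_file_ending e == PySem.Str.lower content_type then e
      else pvInnerA content_type media es

-- outer loop of A over the dict's keys; per iteration: media := k, then the break test,
-- then the inner loop (run only with file_ending = "")
def pvOuterA (content_type : String) (media_types : List (String × List String)) :
    List String → String → String → String × String
  | [], fe, media => (fe, media)
  | k :: ks, fe, _media =>
      if fe ≠ "" then (fe, k)
      else pvOuterA content_type media_types ks
        (pvInnerA content_type k (pvVals media_types k)) k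

def get_valid_media_and_format (content_type : String) (media_types : List (String × List String)) : Option String × Option String :=
  let r := pvOuterA content_type media_types (media_types.map Prod.fst) "" ""
  if r.1 == "" then (none, none) else (some r.2, some r.1)

-- ===== PORT B =====

-- content_type.lower().rsplit("/", 1), ported by hand over List Char:
-- splits at the LAST '/', none when there is no '/' (exact for rsplit with maxsplit=1)
def pvRsplitSlash : List Char → Option (List Char × List Char)
  | [] => none
  | c :: cs =>
      match pvRsplitSlash cs with
      | some (a, b) => some (c :: a, b)
      | none => if c = '/' then some ([], cs) else none

-- B's single scan: first ending translating to format_part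
def pvFindB (format_part : String) : List String → Option String
  | [] => none
  | e :: es => if translate_file_ending e == format_part then some e else pvFindB format_part es

def get_valid_media_and_format_alt (content_type : String) (media_types : List (String × List String)) : Option String × Option String :=
  match pvRsplitSlash (PySem.Str.lower content_type).toList with
  | none => (none, none)
  | some (mp, fp) =>
      match pvFindB (String.ofList fp) (pvVals media_types (String.ofList mp)) with
      | some e => (some (String.ofList mp), some e)
      | none => (none, none)

-- ===== PRECONDITION & SPEC =====
-- Pre_ keeps the association list shaped like a Python dict (distinct keys; duplicates
-- cannot arise from a dict argument) and excludes inputs where an ending that is not a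
-- real file ending (empty or containing '/') is actually matched by the lowered content
-- type: there A's pasted "media/ending" string matches across slash boundaries or, for
-- an empty ending, A silently treats the match as a miss — accidents of the built string.
def Pre_get_valid_media_and_format (content_type : String) (media_types : List (String × List String)) : Prop :=
  (media_types.map Prod.fst).Nodup ∧
  ∀ p ∈ media_types, ∀ e ∈ p.2, (e = "" ∨ '/' ∈ e.toList) →
    p.1 ++ "/" ++ translate_file_ending e ≠ PySem.Str.lower content_type
instance (content_type : String) (media_types : List (String × List String)) : Decidable (Pre_get_valid_media_and_format content_type media_types) := by unfold Pre_get_valid_media_and_format; infer_instance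

def pvWitness_get_valid_media_and_format : String × (List (String × List String)) :=
  ("video/mp4", [("image", ["png", "jpg"]), ("video", ["mp4"])])

-- On inputs whose content type matches an ending of a media-type key that is NOT the
-- last key, A returns the NEXT key as the media (its break runs only after the loop
-- variable is reassigned) while B returns the matching key, which is the intended value.
def D_get_valid_media_and_format (content_type : String) (media_types : List (String × List String)) : Prop :=
  ∃ p ∈ media_types.dropLast, ∃ e ∈ p.2,
    p.1 ++ "/" ++ translate_file_ending e = PySem.Str.lower content_type
instance (content_type : String) (media_types : List (String × List String)) : Decidable (D_get_valid_media_and_format content_type media_types) := by unfold D_get_valid_media_and_format; infer_instance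

def Spec_get_valid_media_and_format (content_type : String) (media_types : List (String × List String)) (out : Option String × Option String) : Prop := ¬ D_get_valid_media_and_format content_type media_types → out = get_valid_media_and_format_alt content_type media_types
instance (content_type : String) (media_types : List (String × List String)) (out : Option String × Option String) : Decidable (Spec_get_valid_media_and_format content_type media_types out) := by unfold Spec_get_valid_media_and_format; infer_instance

def pvDiffWitness_get_valid_media_and_format : String × (List (String × List String)) :=
  ("image/png", [("image", ["png"]), ("video", ["mp4"])])
def pvDiffWitnessOut_get_valid_media_and_format : (Option String × Option String) × (Option String × Option String) :=
  ((some "video", some "png"), (some "image", some "png"))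

-- ===== CLAIM (what is proved, stated in full; the proofs are below) =====
def Claim_unchanged_get_valid_media_and_format : Prop := ∀ (content_type : String) (media_types : List (String × List String)), Dom_get_valid_media_and_format content_type media_types → Pre_get_valid_media_and_format content_type media_types → Spec_get_valid_media_and_format content_type media_types (get_valid_media_and_format content_type media_types)
def Claim_changed_get_valid_media_and_format : Prop := Dom_get_valid_media_and_format (pvDiffWitness_get_valid_media_and_format.1) (pvDiffWitness_get_valid_media_and_format.2) ∧ Pre_get_valid_media_and_format (pvDiffWitness_get_valid_media_and_format.1) (pvDiffWitness_get_valid_media_and_format.2) ∧ D_get_valid_media_and_format (pvDiffWitness_get_valid_media_and_format.1) (pvDiffWitness_get_valid_media_and_format.2) ∧ get_valid_media_and_format (pvDiffWitness_get_valid_media_and_format.1) (pvDiffWitness_get_valid_media_and_format.2) = pvDiffWitnessOut_get_valid_media_and_format.1 ∧ get_valid_media_and_format_alt (pvDiffWitness_get_valid_media_and_format.1) (pvDiffWitness_get_valid_media_and_format.2) = pvDiffWitnessOut_get_valid_media_and_format.2 ∧ pvDiffWitnessOut_get_valid_media_and_format.1 ≠ pvDiffWitnessOut_get_valid_media_and_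format.2
def Claim_exact_get_valid_media_and_format : Prop := ∀ (content_type : String) (media_types : List (String × List String)), Dom_get_valid_media_and_format content_type media_types → Pre_get_valid_media_and_format content_type media_types → D_get_valid_media_and_format content_type media_types → get_valid_media_and_format content_type media_types ≠ get_valid_media_and_format_alt content_type media_types

-- char-level: lowering never creates or destroys a slash
theorem pvLowerChar_ne_slash (c : Char) (h : c ≠ '/') : PySem.Chars.lowerChar c ≠ '/' := by
  unfold PySem.Chars.lowerChar
  split
  · rename_i hu
    unfold PySem.Chars.isupper at hu
    rw [Bool.and_eq_true, decide_eq_true_eq, decide_eq_true_eq, Char.le_def, Char.le_def] at hu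
    intro he
    have h1 : 65 ≤ c.toNat ∧ c.toNat ≤ 90 := by unfold Char.toNat; exact hu
    have hv : (c.toNat + 32).isValidChar := by left; omega
    have h2 : (Char.ofNat (c.toNat + 32)).toNat = c.toNat + 32 := by
      rw [Char.toNat_ofNat, if_pos hv]
    have h3 := congrArg Char.toNat he
    rw [h2] at h3
    have h4 : ('/').toNat = 47 := by decide
    omega
  · exact h

theorem pvLower_no_slash (cs : List Char) (h : '/' ∉ cs) : '/' ∉ PySem.Chars.lower cs := by
  unfold PySem.Chars.lower
  intro hm
  rcases List.mem_map.1 hm with ⟨c, hc, he⟩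
  exact pvLowerChar_ne_slash c (fun h' => h (h' ▸ hc)) he

theorem pvTransGood (e : String) (hne : e ≠ "") (hsl : '/' ∉ e.toList) :
    translate_file_ending e ≠ "" ∧ '/' ∉ (translate_file_ending e).toList := by
  have hne' : e.toList ≠ [] := by
    intro h; apply hne; rw [← String.toList_inj]; simpa using h
  have hlow : translate_file_ending e = "jpeg" ∨ translate_file_ending e = PySem.Str.lower e := by
    by_cases hj : PySem.Str.lower e = "jpg"
    · left; simp [translate_file_ending, pvFileEndingTranslations, hj]
    · right; simp [translate_file_ending, pvFileEndingTranslations, beq_iff_eq, Ne.symm hj]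
  rcases hlow with h | h <;> rw [h]
  · exact ⟨by decide, by decide⟩
  · refine ⟨?_, ?_⟩
    · intro h0
      have h1 := congrArg String.toList h0
      rw [PySem.Str.toList_lower] at h1
      simp [PySem.Chars.lower] at h1
      exact hne h1
    · rw [PySem.Str.toList_lower]; exact pvLower_no_slash _ hsl

-- rsplit facts: pvRsplitSlash splits at the LAST slash
theorem pvRsplit_none_iff (cs : List Char) : pvRsplitSlash cs = none ↔ '/' ∉ cs := by
  induction cs with
  | nil => simp [pvRsplitSlash]
  | cons c cs ih =>
    cases h : pvRsplitSlash cs with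
    | some p =>
      obtain ⟨a, b⟩ := p
      have hin : '/' ∈ cs := by
        by_contra hn
        rw [ih.mpr hn] at h; simp at h
      simp [pvRsplitSlash, h, hin]
    | none =>
      have hcs := ih.mp h
      by_cases hc : c = '/'
      · simp [pvRsplitSlash, h, hc]
      · simp [pvRsplitSlash, h, hc, hcs, Ne.symm hc]

theorem pvRsplit_some (cs a b : List Char) (h : pvRsplitSlash cs = some (a, b)) :
    cs = a ++ '/' :: b ∧ '/' ∉ b := by
  induction cs generalizing a b with
  | nil => simp [pvRsplitSlash] at h
  | cons c cs ih =>
    cases h' : pvRsplitSlash cs with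
    | some p =>
      obtain ⟨a', b'⟩ := p
      simp only [pvRsplitSlash, h'] at h
      obtain ⟨ha, hb⟩ : c :: a' = a ∧ b' = b := by
        constructor <;> [exact congrArg Prod.fst (Option.some.inj h); exact congrArg Prod.snd (Option.some.inj h)]
      obtain ⟨h1, h2⟩ := ih a' b' h'
      subst ha hb
      exact ⟨by rw [h1]; rfl, h2⟩
    | none =>
      simp only [pvRsplitSlash, h'] at h
      by_cases hc : c = '/'
      · rw [if_pos hc] at h
        obtain ⟨ha, hb⟩ : ([] : List Char) = a ∧ cs = b := by
          constructor <;> [exact congrArg Prod.fst (Option.some.inj h); exact congrArg Prod.snd (Option.some.inj h)]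
        subst hc ha
        rw [← hb]
        exact ⟨rfl, (pvRsplit_none_iff cs).mp h'⟩
      · rw [if_neg hc] at h; simp at h

theorem pvRsplit_append (a b : List Char) (hb : '/' ∉ b) :
    pvRsplitSlash (a ++ '/' :: b) = some (a, b) := by
  induction a with
  | nil => simp [pvRsplitSlash, (pvRsplit_none_iff b).mpr hb]
  | cons c a ih => simp [pvRsplitSlash, ih]

-- a good ending matches a media key exactly when rsplit of the lowered content type
-- yields (key, translated ending)
theorem pvMatch_iff (ct k e : String) (hne : e ≠ "") (hsl : '/' ∉ e.toList) :
    (k ++ "/" ++ translate_file_ending e = PySem.Str.lower ct) ↔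
    pvRsplitSlash (PySem.Str.lower ct).toList = some (k.toList, (translate_file_ending e).toList) := by
  obtain ⟨hte, hts⟩ := pvTransGood e hne hsl
  have hsplit : (k ++ "/" ++ translate_file_ending e).toList
      = k.toList ++ '/' :: (translate_file_ending e).toList := by
    rw [String.toList_append, String.toList_append]
    have h2 : ("/" : String).toList = ['/'] := by decide
    rw [h2, List.append_assoc]; rfl
  constructor
  · intro h
    rw [← h, hsplit]
    exact pvRsplit_append _ _ hts
  · intro h
    obtain ⟨h1, _⟩ := pvRsplit_some _ _ _ h
    rw [← String.toList_inj, hsplit, h1]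
  -- scan loops as find?

theorem pvInnerA_eq (ct k : String) (es : List String) :
    pvInnerA ct k es
      = ((es.find? (fun e => k ++ "/" ++ translate_file_ending e == PySem.Str.lower ct)).getD "") := by
  induction es with
  | nil => rfl
  | cons e es ih =>
    cases h : (k ++ "/" ++ translate_file_ending e == PySem.Str.lower ct) with
    | true => simp [pvInnerA, h]
    | false => simp [pvInnerA, h, ih]

theorem pvFindB_eq (fp : String) (es : List String) :
    pvFindB fp es = es.find? (fun e => translate_file_ending e == fp) := by
  induction es with
  | nil => rfl
  | cons e es ih =>
    cases h : (translate_file_ending e == fp) with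
    | true => simp [pvFindB, h]
    | false => simp [pvFindB, h, ih]

-- outer loop: when no key ever matches, file_ending stays ""
theorem pvOuterA_all_empty (ct : String) (mt : List (String × List String))
    (ks : List String) (m : String)
    (h : ∀ k ∈ ks, pvInnerA ct k (pvVals mt k) = "") :
    (pvOuterA ct mt ks "" m).1 = "" := by
  induction ks generalizing m with
  | nil => rfl
  | cons k ks ih =>
    simp only [pvOuterA, ne_eq, not_true_eq_false, reduceIte]
    rw [h k (List.mem_cons_self ..)]
    exact ih _ (fun k' hk' => h k' (List.mem_cons_of_mem _ hk'))

-- outer loop: first matching key km; the media returned is the NEXT key (or km if last)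
theorem pvOuterA_first_match (ct : String) (mt : List (String × List String))
    (ks1 : List String) (km : String) (rest : List String) (m : String)
    (h1 : ∀ k ∈ ks1, pvInnerA ct k (pvVals mt k) = "")
    (h2 : pvInnerA ct km (pvVals mt km) ≠ "") :
    pvOuterA ct mt (ks1 ++ km :: rest) "" m =
      (pvInnerA ct km (pvVals mt km), match rest with | [] => km | k2 :: _ => k2) := by
  induction ks1 generalizing m with
  | nil =>
    cases rest with
    | nil => simp [pvOuterA]
    | cons k2 rest' => simp [pvOuterA, h2]
  | cons k ks1 ih =>
    simp only [List.cons_append, pvOuterA, ne_eq, not_true_eq_false, reduceIte]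
    rw [h1 k (List.mem_cons_self ..)]
    exact ih _ (fun k' hk' => h1 k' (List.mem_cons_of_mem _ hk'))

-- pvVals plumbing
theorem pvVals_of_find? (mt : List (String × List String)) (k : String)
    (p : String × List String) (h : mt.find? (fun q => q.1 == k) = some p) :
    pvVals mt k = p.2 := by simp [pvVals, h]

theorem pvVals_subset (mt : List (String × List String)) (k : String) (e : String)
    (he : e ∈ pvVals mt k) : ∃ p ∈ mt, p.1 = k ∧ e ∈ p.2 := by
  unfold pvVals at he
  cases h : mt.find? (fun q => q.1 == k) with
  | none => rw [h] at he; simp at he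
  | some p =>
    rw [h] at he
    exact ⟨p, List.mem_of_find?_eq_some h, by simpa using List.find?_some h, by simpa using he⟩

-- rsplit at the last slash re-concatenates (string form)
theorem pvConcat_of_rsplit (ct : String) (mp fp : List Char)
    (hr : pvRsplitSlash (PySem.Str.lower ct).toList = some (mp, fp)) :
    String.ofList mp ++ "/" ++ String.ofList fp = PySem.Str.lower ct := by
  obtain ⟨h1, _⟩ := pvRsplit_some _ _ _ hr
  rw [← String.toList_inj, String.toList_append, String.toList_append]
  have h2 : ("/" : String).toList = ['/'] := by decide
  rw [h2, List.append_assoc, h1]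
  simp

theorem pvFind?_congr {α : Type} (l : List α) (p q : α → Bool)
    (h : ∀ x ∈ l, p x = q x) : l.find? p = l.find? q := by
  induction l with
  | nil => rfl
  | cons x xs ih =>
    rw [List.find?_cons, List.find?_cons, h x (List.mem_cons_self ..),
      ih (fun y hy => h y (List.mem_cons_of_mem _ hy))]

-- the main agreement argument
theorem pvMain_unchanged (ct : String) (mt : List (String × List String))
    (hpre : Pre_get_valid_media_and_format ct mt)
    (hnD : ¬ D_get_valid_media_and_format ct mt) :
    get_valid_media_and_format ct mt = get_valid_media_and_format_alt ct mt := by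
  obtain ⟨hnodup, hpre2⟩ := hpre
  cases hr : pvRsplitSlash (PySem.Str.lower ct).toList with
  | none =>
    have hall : ∀ k ∈ mt.map Prod.fst, pvInnerA ct k (pvVals mt k) = "" := by
      intro k hk
      have hfn : (pvVals mt k).find?
          (fun e => k ++ "/" ++ translate_file_ending e == PySem.Str.lower ct) = none := by
        rw [List.find?_eq_none]
        intro e he
        obtain ⟨p, hp, hpk, hep⟩ := pvVals_subset mt k e he
        simp only [beq_iff_eq]
        intro heq
        by_cases hbad : e = "" ∨ '/' ∈ e.toList
        · exact hpre2 p hp e hep hbad (by rw [hpk]; exact heq)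
        · push_neg at hbad
          have h2 := (pvMatch_iff ct k e hbad.1 hbad.2).mp heq
          rw [hr] at h2
          simp at h2
      rw [pvInnerA_eq, hfn]; rfl
    have h0 := pvOuterA_all_empty ct mt (mt.map Prod.fst) "" hall
    have hA : get_valid_media_and_format ct mt = (none, none) := by
      simp only [get_valid_media_and_format]
      rw [h0]
      simp
    have hB : get_valid_media_and_format_alt ct mt = (none, none) := by
      unfold get_valid_media_and_format_alt
      rw [hr]
    rw [hA, hB]
  | some pr =>
    obtain ⟨mp, fp⟩ := pr
    have hmpT : (String.ofList mp).toList = mp := by simp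
    have hfpT : (String.ofList fp).toList = fp := by simp
    have hcat := pvConcat_of_rsplit ct mp fp hr
    -- every scanned (pair, ending) matches iff its key is mp's string and its
    -- translated ending is fp's string — whether or not the ending is a real one
    have hpred : ∀ p ∈ mt, ∀ e ∈ p.2,
        ((p.1 ++ "/" ++ translate_file_ending e = PySem.Str.lower ct) ↔
          (p.1 = String.ofList mp ∧ translate_file_ending e = String.ofList fp)) := by
      intro p hp e hep
      by_cases hbad : e = "" ∨ '/' ∈ e.toList
      · have hno := hpre2 p hp e hep hbad
        constructor
        · intro h; exact absurd h hno
        · rintro ⟨h1, h2⟩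
          exact absurd (by rw [h1, h2]; exact hcat) hno
      · push_neg at hbad
        rw [pvMatch_iff ct p.1 e hbad.1 hbad.2, hr]
        constructor
        · intro h
          have h1 := congrArg Prod.fst (Option.some.inj h)
          have h2 := congrArg Prod.snd (Option.some.inj h)
          constructor
          · rw [← String.toList_inj, hmpT]; exact h1.symm
          · rw [← String.toList_inj, hfpT]; exact h2.symm
        · rintro ⟨h1, h2⟩
          rw [h1, h2, hmpT, hfpT]
    cases hfb : pvFindB (String.ofList fp) (pvVals mt (String.ofList mp)) with
    | none =>
      have hall : ∀ k ∈ mt.map Prod.fst, pvInnerA ct k (pvVals mt k) = "" := by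
        intro k hk
        have hfn : (pvVals mt k).find?
            (fun e => k ++ "/" ++ translate_file_ending e == PySem.Str.lower ct) = none := by
          rw [List.find?_eq_none]
          intro e he
          obtain ⟨p, hp, hpk, hep⟩ := pvVals_subset mt k e he
          simp only [beq_iff_eq]
          intro heq
          obtain ⟨hk1, hk2⟩ := (hpred p hp e hep).mp (by rw [hpk]; exact heq)
          rw [pvFindB_eq, List.find?_eq_none] at hfb
          have hkk : k = String.ofList mp := by rw [← hpk]; exact hk1
          subst hkk
          exact hfb e he (by simp [hk2])
        rw [pvInnerA_eq, hfn]; rfl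
      have h0 := pvOuterA_all_empty ct mt (mt.map Prod.fst) "" hall
      have hA : get_valid_media_and_format ct mt = (none, none) := by
        simp only [get_valid_media_and_format]
        rw [h0]
        simp
      have hB : get_valid_media_and_format_alt ct mt = (none, none) := by
        unfold get_valid_media_and_format_alt
        rw [hr]
        show (match pvFindB (String.ofList fp) (pvVals mt (String.ofList mp)) with
          | some e => (some (String.ofList mp), some e)
          | none => (none, none)) = _
        rw [hfb]
      rw [hA, hB]
    | some e =>
      have hfb0 := hfb
      rw [pvFindB_eq] at hfb
      have heq2 : translate_file_ending e = String.ofList fp := by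
        have := List.find?_some hfb; simpa using this
      have hemem : e ∈ pvVals mt (String.ofList mp) := List.mem_of_find?_eq_some hfb
      cases hfk : mt.find? (fun q => q.1 == String.ofList mp) with
      | none =>
        exfalso; unfold pvVals at hemem; rw [hfk] at hemem; simp at hemem
      | some pf =>
        have hvals : pvVals mt (String.ofList mp) = pf.2 := pvVals_of_find? mt _ pf hfk
        obtain ⟨hpf1, pre, post, hsplit, hprefix⟩ := List.find?_eq_some_iff_append.mp hfk
        have hpf1' : pf.1 = String.ofList mp := by simpa using hpf1
        have hpfmem : pf ∈ mt := List.mem_of_find?_eq_some hfk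
        have hemem2 : e ∈ pf.2 := by rw [hvals] at hemem; exact hemem
        have hmatch : pf.1 ++ "/" ++ translate_file_ending e = PySem.Str.lower ct :=
          (hpred pf hpfmem e hemem2).mpr ⟨hpf1', heq2⟩
        have hene : e ≠ "" := fun h0 => hpre2 pf hpfmem e hemem2 (Or.inl h0) hmatch
        have hpost : post = [] := by
          cases post with
          | nil => rfl
          | cons q post' =>
            exfalso; apply hnD
            refine ⟨pf, ?_, e, hemem2, hmatch⟩
            rw [hsplit, List.dropLast_append_of_ne_nil (by simp)]
            simp [List.dropLast]
        subst hpost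
        have hkeys : mt.map Prod.fst = pre.map Prod.fst ++ [pf.1] := by rw [hsplit]; simp
        have hpre_empty : ∀ k ∈ pre.map Prod.fst, pvInnerA ct k (pvVals mt k) = "" := by
          intro k hk
          obtain ⟨q, hq, hq1⟩ := List.mem_map.mp hk
          have hkne : k ≠ String.ofList mp := by
            rw [← hq1]
            intro h
            have hh := hprefix q hq
            rw [h] at hh
            simp at hh
          have hfn : (pvVals mt k).find?
              (fun e' => k ++ "/" ++ translate_file_ending e' == PySem.Str.lower ct) = none := by
            rw [List.find?_eq_none]
            intro e' he'
            obtain ⟨p, hp, hpk, hep⟩ := pvVals_subset mt k e' he'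
            simp only [beq_iff_eq]
            intro heq'
            apply hkne
            rw [← hpk]
            exact ((hpred p hp e' hep).mp (by rw [hpk]; exact heq')).1
          rw [pvInnerA_eq, hfn]; rfl
        have hinner : pvInnerA ct pf.1 (pvVals mt pf.1) = e := by
          have hv2 : pvVals mt pf.1 = pf.2 := by rw [hpf1']; exact hvals
          rw [pvInnerA_eq, hv2]
          have hc : pf.2.find? (fun e' => pf.1 ++ "/" ++ translate_file_ending e' == PySem.Str.lower ct)
              = pf.2.find? (fun e' => translate_file_ending e' == String.ofList fp) := by
            apply pvFind?_congr
            intro e' he'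
            by_cases hb : translate_file_ending e' = String.ofList fp
            · have hx := (hpred pf hpfmem e' he').mpr ⟨hpf1', hb⟩
              rw [hb] at hx
              simp [hb, hx]
            · have hx : ¬ (pf.1 ++ "/" ++ translate_file_ending e' = PySem.Str.lower ct) :=
                fun hx => hb ((hpred pf hpfmem e' he').mp hx).2
              simp [hb, hx]
          rw [hc]
          rw [hvals] at hfb
          rw [hfb]; rfl
        have hfm := pvOuterA_first_match ct mt (pre.map Prod.fst) pf.1 [] ""
          hpre_empty (by rw [hinner]; exact hene)
        have hA : get_valid_media_and_format ct mt = (some pf.1, some e) := by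
          unfold get_valid_media_and_format
          rw [hkeys, hfm, hinner]
          simp [hene]
        have hB : get_valid_media_and_format_alt ct mt = (some (String.ofList mp), some e) := by
          unfold get_valid_media_and_format_alt
          rw [hr]
          show (match pvFindB (String.ofList fp) (pvVals mt (String.ofList mp)) with
            | some e => (some (String.ofList mp), some e)
            | none => (none, none)) = _
          rw [hfb0]
        rw [hA, hB, hpf1']

-- inside D_: A names the key AFTER the matching one, B names the matching one
theorem pvMain_tight (ct : String) (mt : List (String × List String))
    (hpre : Pre_get_valid_media_and_format ct mt)
    (hD : D_get_valid_media_and_format ct mt) :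
    get_valid_media_and_format ct mt ≠ get_valid_media_and_format_alt ct mt := by
  obtain ⟨hnodup, hpre2⟩ := hpre
  obtain ⟨q, hqd, e, heq, hmatch⟩ := hD
  have hq : q ∈ mt := (List.dropLast_sublist mt).subset hqd
  have hgoode : e ≠ "" ∧ '/' ∉ e.toList := by
    by_cases h : e = "" ∨ '/' ∈ e.toList
    · exact absurd hmatch (hpre2 q hq e heq h)
    · push_neg at h; exact h
  obtain ⟨hene, hesl⟩ := hgoode
  have hr : pvRsplitSlash (PySem.Str.lower ct).toList
      = some (q.1.toList, (translate_file_ending e).toList) :=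
    (pvMatch_iff ct q.1 e hene hesl).mp hmatch
  have hofl : String.ofList q.1.toList = q.1 := by simp
  have hofl2 : String.ofList (translate_file_ending e).toList = translate_file_ending e := by simp
  have hpred : ∀ p ∈ mt, ∀ e' ∈ p.2,
      ((p.1 ++ "/" ++ translate_file_ending e' = PySem.Str.lower ct) ↔
        (p.1 = q.1 ∧ translate_file_ending e' = translate_file_ending e)) := by
    intro p hp e' hep
    by_cases hbad : e' = "" ∨ '/' ∈ e'.toList
    · have hno := hpre2 p hp e' hep hbad
      constructor
      · intro h; exact absurd h hno
      · rintro ⟨h3, h4⟩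
        exact absurd (by rw [h3, h4]; exact hmatch) hno
    · push_neg at hbad
      rw [pvMatch_iff ct p.1 e' hbad.1 hbad.2, hr]
      constructor
      · intro h
        have ha := congrArg Prod.fst (Option.some.inj h)
        have hb := congrArg Prod.snd (Option.some.inj h)
        exact ⟨String.toList_inj.mp ha.symm, String.toList_inj.mp hb.symm⟩
      · rintro ⟨h3, h4⟩; rw [h3, h4]
  -- the dict lookup of q's key returns q itself (keys are distinct)
  have hfk : mt.find? (fun p => p.1 == q.1) = some q := by
    cases h : mt.find? (fun p => p.1 == q.1) with
    | none => exact absurd (by simp) (List.find?_eq_none.mp h q hq)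
    | some q' =>
      have hq' : q' ∈ mt := List.mem_of_find?_eq_some h
      have he1 : q'.1 = q.1 := by simpa using List.find?_some h
      rw [List.inj_on_of_nodup_map hnodup hq' hq he1]
  have hvals : pvVals mt q.1 = q.2 := pvVals_of_find? mt q.1 q hfk
  -- B returns q's own key
  have hfind : ∃ eB, pvFindB (String.ofList (translate_file_ending e).toList)
      (pvVals mt (String.ofList q.1.toList)) = some eB := by
    rw [hofl, hofl2, hvals, pvFindB_eq]
    exact Option.isSome_iff_exists.mp (List.find?_isSome.mpr ⟨e, heq, by simp⟩)
  obtain ⟨eB, hfB⟩ := hfind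
  have hB : get_valid_media_and_format_alt ct mt = (some q.1, some eB) := by
    unfold get_valid_media_and_format_alt
    rw [hr]
    show (match pvFindB (String.ofList (translate_file_ending e).toList)
        (pvVals mt (String.ofList q.1.toList)) with
      | some e => (some (String.ofList (q.1.toList)), some e)
      | none => (none, none)) = _
    rw [hfB, hofl]
  -- A: find the first key whose inner scan matches
  have hsome : ((pvVals mt q.1).find?
      (fun e' => q.1 ++ "/" ++ translate_file_ending e' == PySem.Str.lower ct)).isSome = true := by
    rw [hvals]
    exact List.find?_isSome.mpr ⟨e, heq, by simpa using hmatch⟩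
  obtain ⟨e1, he1⟩ := Option.isSome_iff_exists.mp hsome
  have hpkq : pvInnerA ct q.1 (pvVals mt q.1) ≠ "" := by
    rw [pvInnerA_eq, he1, Option.getD_some]
    have hm1 : q.1 ++ "/" ++ translate_file_ending e1 = PySem.Str.lower ct := by
      simpa using List.find?_some he1
    have he1m : e1 ∈ q.2 := by rw [← hvals]; exact List.mem_of_find?_eq_some he1
    intro h0
    exact hpre2 q hq e1 he1m (Or.inl h0) hm1
  have hkfind : ∃ km, (mt.map Prod.fst).find?
      (fun k => !(pvInnerA ct k (pvVals mt k) == "")) = some km := by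
    refine Option.isSome_iff_exists.mp (List.find?_isSome.mpr ⟨q.1, ?_, by simp [hpkq]⟩)
    exact List.mem_map.mpr ⟨q, hq, rfl⟩
  obtain ⟨km, hkm⟩ := hkfind
  obtain ⟨hpkm, ks1, rest, hkeys, hks1⟩ := List.find?_eq_some_iff_append.mp hkm
  have hkmne : pvInnerA ct km (pvVals mt km) ≠ "" := by simpa using hpkm
  have hks1' : ∀ k ∈ ks1, pvInnerA ct k (pvVals mt k) = "" := by
    intro k hk
    have := hks1 k hk
    simpa using this
  -- the matching element found by A's inner scan at km
  have hinner : ∃ em, pvInnerA ct km (pvVals mt km) = em ∧ em ∈ pvVals mt km := by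
    rw [pvInnerA_eq]
    cases h : (pvVals mt km).find?
        (fun e' => km ++ "/" ++ translate_file_ending e' == PySem.Str.lower ct) with
    | none => rw [pvInnerA_eq, h] at hkmne; simp at hkmne
    | some em => exact ⟨em, rfl, List.mem_of_find?_eq_some h⟩
  obtain ⟨em, hem, hemmem⟩ := hinner
  have hkmq : km = q.1 := by
    rw [pvInnerA_eq] at hem
    cases h : (pvVals mt km).find?
        (fun e' => km ++ "/" ++ translate_file_ending e' == PySem.Str.lower ct) with
    | none => rw [pvInnerA_eq, h] at hkmne; simp at hkmne
    | some em' =>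
      obtain ⟨p, hp, hpk, hep⟩ := pvVals_subset mt km em' (List.mem_of_find?_eq_some h)
      have hm' := List.find?_some h
      rw [← hpk]
      exact ((hpred p hp em' hep).mp (by rw [hpk]; simpa using hm')).1
  -- rest cannot be empty: q sits before the last key
  have hrest : ∃ k2 rest', rest = k2 :: rest' := by
    cases rest with
    | cons k2 rest' => exact ⟨k2, rest', rfl⟩
    | nil =>
      exfalso
      have hq1d : q.1 ∈ (mt.map Prod.fst).dropLast := by
        rw [← List.map_dropLast]
        exact List.mem_map.mpr ⟨q, hqd, rfl⟩
      rw [hkeys, List.dropLast_concat] at hq1d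
      have : km ∉ ks1 := by
        have hh := hnodup
        rw [hkeys] at hh
        have := List.disjoint_of_nodup_append hh
        intro hmem
        exact this hmem (List.mem_singleton.mpr rfl)
      exact this (hkmq ▸ hq1d)
  obtain ⟨k2, rest', hrest'⟩ := hrest
  subst hrest'
  have hfm := pvOuterA_first_match ct mt ks1 km (k2 :: rest') "" hks1' hkmne
  have hA : get_valid_media_and_format ct mt = (some k2, some em) := by
    simp only [get_valid_media_and_format]
    rw [hkeys, hfm, hem]
    have : em ≠ "" := hem ▸ hkmne
    simp [this]
  have hk2 : km ≠ k2 := by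
    have hh := hnodup
    rw [hkeys] at hh
    have h3 := (List.nodup_append.mp hh).2.1
    have h4 := (List.nodup_cons.mp h3).1
    intro h
    exact h4 (h ▸ List.mem_cons_self ..)
  intro hAB
  rw [hA, hB] at hAB
  have := congrArg Prod.fst hAB
  simp at this
  exact hk2 (by rw [this, hkmq])

-- ===== VERDICT (by name: the statement is the Claim_ definition above) =====
theorem get_valid_media_and_format_spec : Claim_unchanged_get_valid_media_and_format := by
  intro ct mt _hdom hpre hnD
  exact pvMain_unchanged ct mt hpre hnD
theorem get_valid_media_and_format_changed : Claim_changed_get_valid_media_and_format := by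
  unfold Claim_changed_get_valid_media_and_format; decide
theorem get_valid_media_and_format_tight : Claim_exact_get_valid_media_and_format := by
  intro ct mt _hdom hpre hD
  exact pvMain_tight ct mt hpre hD
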